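-- pv_equiv track=rewrite | github.com/Amin-Mohamed1/ConnectFourGame | Application/Services/HeuristicCriterias/CouldConnectFourInOneMove.py | __twos_to_fours_diagonal
-- ===== SOURCE A (Python) =====
-- def __twos_to_fours_diagonal(board: list[list[str]], piece: str) -> int:
--     score: int = 0
--     for row in range(len(board)):
--         for col in range(len(board[0])):
--             if board[row][col] == piece:
--                 if (row + 3 < len(board) and col + 3 < len(board[0])) and (board[row + 1][col + 1] == piece) and \
--                         board[row + 2][col + 2] == '' and board[row + 3][col + 3] == piece:
--                     score += 1
--                 if (row + 3 < len(board) and col - 3 >= 0) and (board[row + 1][col - 1] == piece) and board[row + 2][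
--                     col - 2] == '' and board[row + 3][col - 3] == piece:
--                     score += 1
--     return score
-- ===== SOURCE B (Python) =====
-- def __twos_to_fours_diagonal(board: list[list[str]], piece: str) -> int:
--     # Staged: first materialize every diagonal of the board as a list, then
--     # count sliding windows equal to (piece, piece, '', piece) in each line.
--     if not board:
--         return 0
--     h, w = len(board), len(board[0])
--
--     def window_count(line):
--         n = 0
--         for k in range(len(line) - 3):
--             if line[k] == piece and line[k + 1] == piece \
--                     and line[k + 2] == '' and line[k + 3] == piece:
--                 n += 1
--         return n
--
--     lines = []
--     # "down-right" diagonals, from the top row and the left column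
--     for c in range(w):
--         lines.append([board[k][c + k] for k in range(min(h, w - c))])
--     for r in range(1, h):
--         lines.append([board[r + k][k] for k in range(min(h - r, w))])
--     # "down-left" diagonals, from the top row and the right column
--     for c in range(w):
--         lines.append([board[k][c - k] for k in range(min(h, c + 1))])
--     for r in range(1, h):
--         lines.append([board[r + k][w - 1 - k] for k in range(min(h - r, w))])
--
--     return sum(window_count(line) for line in lines)
-- ===== Notes on version B (the rewrite author's own statement) =====
-- stated objective: alternative
-- what changed: B is a staged two-pass algorithm: it first materializes every diagonal of the board as an explicit list (down-right and down-left, started from the edges), then counts sliding windows of length 4 equal to (piece, piece, '', piece) in each line; A instead scans every cell and peeks at three bounds-checked offsets.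
import Mathlib
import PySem

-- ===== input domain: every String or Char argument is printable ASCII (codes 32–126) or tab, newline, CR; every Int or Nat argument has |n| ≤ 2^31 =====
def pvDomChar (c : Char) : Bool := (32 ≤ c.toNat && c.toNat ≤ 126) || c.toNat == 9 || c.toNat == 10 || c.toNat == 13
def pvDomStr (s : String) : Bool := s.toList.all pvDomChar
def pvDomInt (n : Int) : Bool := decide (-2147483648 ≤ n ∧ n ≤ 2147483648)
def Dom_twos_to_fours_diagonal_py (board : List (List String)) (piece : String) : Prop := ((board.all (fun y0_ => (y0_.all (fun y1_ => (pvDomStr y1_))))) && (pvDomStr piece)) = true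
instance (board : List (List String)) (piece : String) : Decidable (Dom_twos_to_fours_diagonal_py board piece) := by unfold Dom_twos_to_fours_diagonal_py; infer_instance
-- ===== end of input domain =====

-- B replaces A's per-cell bounds-checked offset peeks by a staged algorithm: first build
-- every diagonal line of the board explicitly, then count sliding 4-windows equal to
-- (piece, piece, '', piece) in each line; same asymptotic cost, different decomposition.

-- ===== PORT A =====
-- board[r][c] lookup; out-of-range reads default "" — Pre_ excludes the boards where Python would raise
def pvCell (board : List (List String)) (r c : Nat) : String :=
  (board.getD r []).getD c ""

def twos_to_fours_diagonal_py (board : List (List String)) (piece : String) : Int :=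
  (List.range board.length).foldl (fun score row =>
    (List.range (board.headD []).length).foldl (fun score col =>
      if pvCell board row col = piece then
        let score := if row + 3 < board.length ∧ col + 3 < (board.headD []).length ∧
            pvCell board (row + 1) (col + 1) = piece ∧ pvCell board (row + 2) (col + 2) = "" ∧
            pvCell board (row + 3) (col + 3) = piece then score + 1 else score
        let score := if row + 3 < board.length ∧ 3 ≤ col ∧
            pvCell board (row + 1) (col - 1) = piece ∧ pvCell board (row + 2) (col - 2) = "" ∧
            pvCell board (row + 3) (col - 3) = piece then score + 1 else score
        score
      else score) score) 0

-- ===== PORT B =====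
-- window_count: number of sliding 4-windows of the line equal to (piece, piece, '', piece)
def pvLineCount (piece : String) (line : List String) : Int :=
  (List.range (line.length - 3)).foldl (fun n k =>
    if line.getD k "" = piece ∧ line.getD (k + 1) "" = piece ∧
       line.getD (k + 2) "" = "" ∧ line.getD (k + 3) "" = piece
    then n + 1 else n) 0

def twos_to_fours_diagonal_py_alt (board : List (List String)) (piece : String) : Int :=
  match board with
  | [] => 0
  | r0 :: _ =>
    let h := board.length
    let w := r0.length
    let lines :=
      ((List.range w).map (fun c =>
          (List.range (min h (w - c))).map (fun k => pvCell board k (c + k)))) ++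
      ((List.range' 1 (h - 1)).map (fun r =>
          (List.range (min (h - r) w)).map (fun k => pvCell board (r + k) k))) ++
      ((List.range w).map (fun c =>
          (List.range (min h (c + 1))).map (fun k => pvCell board k (c - k)))) ++
      ((List.range' 1 (h - 1)).map (fun r =>
          (List.range (min (h - r) w)).map (fun k => pvCell board (r + k) (w - 1 - k))))
    (lines.map (pvLineCount piece)).sum

-- ===== PRECONDITION & SPEC =====
-- Pre_ excludes exactly the boards on which Python A raises IndexError: a row shorter than row 0
-- (A indexes every row at all columns 0..len(board[0])-1).
def Pre_twos_to_fours_diagonal_py (board : List (List String)) (_piece : String) : Prop :=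
  ∀ r ∈ board, (board.headD []).length ≤ r.length
instance (board : List (List String)) (piece : String) : Decidable (Pre_twos_to_fours_diagonal_py board piece) := by unfold Pre_twos_to_fours_diagonal_py; infer_instance

def pvWitness_twos_to_fours_diagonal_py : List (List String) × String :=
  ([["x", "x", "", "x"], ["", "x", "", ""], ["", "", "", ""], ["", "", "", "x"]], "x")

def Spec_twos_to_fours_diagonal_py (board : List (List String)) (piece : String) (out : Int) : Prop := out = twos_to_fours_diagonal_py_alt board piece
instance (board : List (List String)) (piece : String) (out : Int) : Decidable (Spec_twos_to_fours_diagonal_py board piece out) := by unfold Spec_twos_to_fours_diagonal_py; infer_instance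

-- ===== CLAIM (what is proved, stated in full; the proofs are below) =====
def Claim_equal_twos_to_fours_diagonal_py : Prop := ∀ (board : List (List String)) (piece : String), Dom_twos_to_fours_diagonal_py board piece → Pre_twos_to_fours_diagonal_py board piece → Spec_twos_to_fours_diagonal_py board piece (twos_to_fours_diagonal_py board piece)

-- ===== LEMMAS AND PROOFS =====

-- indicator of A's first (↘) pattern at (r, c)
def pvInd1 (board : List (List String)) (piece : String) (r c : Nat) : Int :=
  if pvCell board r c = piece ∧ (r + 3 < board.length ∧ c + 3 < (board.headD []).length ∧
      pvCell board (r + 1) (c + 1) = piece ∧ pvCell board (r + 2) (c + 2) = "" ∧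
      pvCell board (r + 3) (c + 3) = piece) then 1 else 0

-- indicator of A's second (↙) pattern at (r, c)
def pvInd2 (board : List (List String)) (piece : String) (r c : Nat) : Int :=
  if pvCell board r c = piece ∧ (r + 3 < board.length ∧ 3 ≤ c ∧
      pvCell board (r + 1) (c - 1) = piece ∧ pvCell board (r + 2) (c - 2) = "" ∧
      pvCell board (r + 3) (c - 3) = piece) then 1 else 0

lemma A_inner (board : List (List String)) (piece : String) (r : Nat) (score : Int) :
    (List.range (board.headD []).length).foldl (fun score col =>
      if pvCell board r col = piece then
        let score := if r + 3 < board.length ∧ col + 3 < (board.headD []).length ∧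
            pvCell board (r + 1) (col + 1) = piece ∧ pvCell board (r + 2) (col + 2) = "" ∧
            pvCell board (r + 3) (col + 3) = piece then score + 1 else score
        let score := if r + 3 < board.length ∧ 3 ≤ col ∧
            pvCell board (r + 1) (col - 1) = piece ∧ pvCell board (r + 2) (col - 2) = "" ∧
            pvCell board (r + 3) (col - 3) = piece then score + 1 else score
        score
      else score) score =
    score + ((List.range (board.headD []).length).map (fun c =>
      pvInd1 board piece r c + pvInd2 board piece r c)).sum := by
  rw [PySem.List.foldl_congr_mem _ _
    (fun s c => s + (pvInd1 board piece r c + pvInd2 board piece r c)) _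
    (by
      intro s c _
      simp only [pvInd1, pvInd2]
      split_ifs <;> first | omega | tauto)]
  rw [PySem.List.foldl_add]

lemma A_eq_sum (board : List (List String)) (piece : String) :
    twos_to_fours_diagonal_py board piece =
      ((List.range board.length).map (fun r =>
        ((List.range (board.headD []).length).map (fun c =>
          pvInd1 board piece r c + pvInd2 board piece r c)).sum)).sum := by
  unfold twos_to_fours_diagonal_py
  rw [PySem.List.foldl_congr_mem _ _
    (fun s r => s + ((List.range (board.headD []).length).map (fun c =>
      pvInd1 board piece r c + pvInd2 board piece r c)).sum) _
    (by intro s r _; exact A_inner board piece r s)]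
  rw [PySem.List.foldl_add, zero_add]

-- list sum over range ↔ Finset sum over range
lemma lsum (n : Nat) (f : Nat → Int) :
    ((List.range n).map f).sum = ∑ i ∈ Finset.range n, f i := by
  induction n with
  | zero => simp
  | succ n ih =>
    rw [List.range_succ, List.map_append, List.sum_append, Finset.sum_range_succ, ih]
    simp

lemma sum_range_cut (n k : Nat) (f : Nat → Int) (h0 : ∀ i, n - k ≤ i → f i = 0) :
    ((List.range n).map f).sum = ((List.range (n - k)).map f).sum := by
  have hn : n = (n - k) + (n - (n - k)) := by omega
  conv_lhs => rw [hn]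
  rw [List.range_add, List.map_append, List.sum_append, List.map_map]
  have : (((List.range (n - (n - k))).map (f ∘ fun x => (n - k) + x))).sum = 0 := by
    apply List.sum_eq_zero
    intro x hx
    simp only [List.mem_map, List.mem_range, Function.comp] at hx
    obtain ⟨i, hi, rfl⟩ := hx
    exact h0 _ (by omega)
  rw [this, add_zero]

lemma getD_rmap (L j : Nat) (f : Nat → String) (hj : j < L) :
    ((List.range L).map f).getD j "" = f j := by
  rw [List.getD_eq_getElem _ _ (by simpa using hj)]
  simp

-- a line's window count as a sum of per-position indicators
lemma lineCount_eq (piece : String) (L : Nat) (f : Nat → String) (ind : Nat → Int)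
    (hind : ∀ k, k + 3 < L → ind k =
      (if f k = piece ∧ f (k + 1) = piece ∧ f (k + 2) = "" ∧ f (k + 3) = piece then 1 else 0))
    (hzero : ∀ k, L ≤ k + 3 → ind k = 0) :
    pvLineCount piece ((List.range L).map f) = ((List.range L).map ind).sum := by
  simp only [pvLineCount, List.length_map, List.length_range]
  rw [PySem.List.foldl_congr_mem _ _ (fun n k => n + ind k) _ (by
    intro n k hk
    simp only [List.mem_range] at hk
    show _ = n + ind k
    rw [getD_rmap _ _ _ (by omega), getD_rmap _ _ _ (by omega),
        getD_rmap _ _ _ (by omega), getD_rmap _ _ _ (by omega), hind k (by omega)]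
    split_ifs <;> omega)]
  rw [PySem.List.foldl_add, zero_add]
  exact (sum_range_cut L 3 ind (fun i hi => hzero i (by omega))).symm

-- a ↘ diagonal line's window count is the sum of pvInd1 along the line
lemma line1_sum (board : List (List String)) (piece : String) (r0 c0 : Nat) :
    pvLineCount piece ((List.range (min (board.length - r0) ((board.headD []).length - c0))).map
        (fun k => pvCell board (r0 + k) (c0 + k)))
    = ((List.range (min (board.length - r0) ((board.headD []).length - c0))).map
        (fun k => pvInd1 board piece (r0 + k) (c0 + k))).sum := by
  apply lineCount_eq
  · intro k hk
    simp only [pvInd1]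
    refine if_congr (Iff.intro ?_ ?_) rfl rfl
    · rintro ⟨a, -, -, b, c, d⟩; exact ⟨a, b, c, d⟩
    · rintro ⟨a, b, c, d⟩; exact ⟨a, by omega, by omega, b, c, d⟩
  · intro k hk
    simp only [pvInd1]
    rw [if_neg]
    rintro ⟨-, hb, hc, -⟩
    omega

-- a ↙ diagonal line's window count is the sum of pvInd2 along the line
lemma line2_sum (board : List (List String)) (piece : String) (r0 c0 : Nat) :
    pvLineCount piece ((List.range (min (board.length - r0) (c0 + 1))).map
        (fun k => pvCell board (r0 + k) (c0 - k)))
    = ((List.range (min (board.length - r0) (c0 + 1))).map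
        (fun k => pvInd2 board piece (r0 + k) (c0 - k))).sum := by
  apply lineCount_eq
  · intro k hk
    simp only [pvInd2]
    refine if_congr (Iff.intro ?_ ?_) rfl rfl
    · rintro ⟨a, -, -, b, c, d⟩; exact ⟨a, b, c, d⟩
    · rintro ⟨a, b, c, d⟩; exact ⟨a, by omega, by omega, b, c, d⟩
  · intro k hk
    simp only [pvInd2]
    rw [if_neg]
    rintro ⟨-, hb, hc, -⟩
    omega

-- regrouping a per-cell sum by ↘ diagonals (starts on the top row and the left column)
lemma reorg (g : Nat → Nat → Int) (h w : Nat) :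
    ((∑ c ∈ Finset.range w, ∑ k ∈ Finset.range (min h (w - c)), g k (c + k)) +
     (∑ i ∈ Finset.range (h - 1), ∑ k ∈ Finset.range (min (h - (1 + i)) w), g (1 + i + k) k))
    = ∑ r ∈ Finset.range h, ∑ c ∈ Finset.range w, g r c := by
  rw [← Finset.sum_product']
  rw [← Finset.sum_filter_add_sum_filter_not (Finset.range h ×ˢ Finset.range w)
      (fun x => x.1 ≤ x.2) (fun x => g x.1 x.2)]
  congr 1
  · rw [Finset.sum_sigma']
    refine Finset.sum_nbij' (fun x => (x.2, x.1 + x.2)) (fun p => ⟨p.2 - p.1, p.1⟩)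
      ?_ ?_ ?_ ?_ ?_
    · rintro ⟨c, k⟩ hx
      simp only [Finset.mem_sigma, Finset.mem_range] at hx
      simp only [Finset.mem_filter, Finset.mem_product, Finset.mem_range]
      omega
    · rintro ⟨r, c⟩ hp
      simp only [Finset.mem_filter, Finset.mem_product, Finset.mem_range] at hp
      simp only [Finset.mem_sigma, Finset.mem_range]
      omega
    · rintro ⟨c, k⟩ _
      simp
    · rintro ⟨r, c⟩ hp
      simp only [Finset.mem_filter, Finset.mem_product, Finset.mem_range] at hp
      simp only [Prod.mk.injEq, true_and]
      omega
    · rintro ⟨c, k⟩ _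
      rfl
  · rw [Finset.sum_sigma']
    refine Finset.sum_nbij' (fun x => (1 + x.1 + x.2, x.2)) (fun p => ⟨p.1 - p.2 - 1, p.2⟩)
      ?_ ?_ ?_ ?_ ?_
    · rintro ⟨i, k⟩ hx
      simp only [Finset.mem_sigma, Finset.mem_range] at hx
      simp only [Finset.mem_filter, Finset.mem_product, Finset.mem_range]
      omega
    · rintro ⟨r, c⟩ hp
      simp only [Finset.mem_filter, Finset.mem_product, Finset.mem_range] at hp
      simp only [Finset.mem_sigma, Finset.mem_range]
      omega
    · rintro ⟨i, k⟩ hx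
      simp only [Finset.mem_sigma, Finset.mem_range] at hx
      simp only [Sigma.mk.injEq, heq_eq_eq, and_true]
      omega
    · rintro ⟨r, c⟩ hp
      simp only [Finset.mem_filter, Finset.mem_product, Finset.mem_range] at hp
      simp only [Prod.mk.injEq, and_true]
      omega
    · rintro ⟨i, k⟩ _
      rfl

-- family 1: the ↘ lines started on the top row
lemma fam1 (bd : List (List String)) (piece : String) :
    ((List.range (bd.headD []).length).map (fun c =>
       pvLineCount piece ((List.range (min bd.length ((bd.headD []).length - c))).map
         (fun k => pvCell bd k (c + k))))).sum
    = ∑ c ∈ Finset.range (bd.headD []).length,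
        ∑ k ∈ Finset.range (min bd.length ((bd.headD []).length - c)),
          pvInd1 bd piece k (c + k) := by
  rw [lsum]
  refine Finset.sum_congr rfl fun c _ => ?_
  have h := line1_sum bd piece 0 c
  simp only [Nat.zero_add, Nat.sub_zero] at h
  rw [h, lsum]

-- family 2: the ↘ lines started on the left column (rows 1..)
lemma fam2 (bd : List (List String)) (piece : String) :
    ((List.range' 1 (bd.length - 1)).map (fun r =>
       pvLineCount piece ((List.range (min (bd.length - r) (bd.headD []).length)).map
         (fun k => pvCell bd (r + k) k)))).sum
    = ∑ i ∈ Finset.range (bd.length - 1),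
        ∑ k ∈ Finset.range (min (bd.length - (1 + i)) (bd.headD []).length),
          pvInd1 bd piece (1 + i + k) k := by
  rw [List.range'_eq_map_range, List.map_map, lsum]
  refine Finset.sum_congr rfl fun i _ => ?_
  simp only [Function.comp_apply]
  have h := line1_sum bd piece (1 + i) 0
  simp only [Nat.zero_add, Nat.sub_zero] at h
  rw [h, lsum]

-- family 3: the ↙ lines started on the top row
lemma fam3 (bd : List (List String)) (piece : String) :
    ((List.range (bd.headD []).length).map (fun c =>
       pvLineCount piece ((List.range (min bd.length (c + 1))).map
         (fun k => pvCell bd k (c - k))))).sum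
    = ∑ c ∈ Finset.range (bd.headD []).length,
        ∑ k ∈ Finset.range (min bd.length (c + 1)), pvInd2 bd piece k (c - k) := by
  rw [lsum]
  refine Finset.sum_congr rfl fun c _ => ?_
  have h := line2_sum bd piece 0 c
  simp only [Nat.zero_add, Nat.sub_zero] at h
  rw [h, lsum]

-- family 4: the ↙ lines started on the right column (rows 1..)
lemma fam4 (bd : List (List String)) (piece : String) (hw : 1 ≤ (bd.headD []).length) :
    ((List.range' 1 (bd.length - 1)).map (fun r =>
       pvLineCount piece ((List.range (min (bd.length - r) (bd.headD []).length)).map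
         (fun k => pvCell bd (r + k) ((bd.headD []).length - 1 - k))))).sum
    = ∑ i ∈ Finset.range (bd.length - 1),
        ∑ k ∈ Finset.range (min (bd.length - (1 + i)) (bd.headD []).length),
          pvInd2 bd piece (1 + i + k) ((bd.headD []).length - 1 - k) := by
  rw [List.range'_eq_map_range, List.map_map, lsum]
  refine Finset.sum_congr rfl fun i _ => ?_
  simp only [Function.comp_apply]
  have h := line2_sum bd piece (1 + i) ((bd.headD []).length - 1)
  rw [show (bd.headD []).length - 1 + 1 = (bd.headD []).length from by omega] at h
  rw [h, lsum]

lemma sum_map_zero {α : Type} (l : List α) : (l.map (fun _ => (0 : Int))).sum = 0 := by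
  induction l with
  | nil => rfl
  | cons a l ih => simp only [List.map_cons, List.sum_cons, ih, add_zero]

-- ===== VERDICT (by name: the statement is the Claim_ definition above) =====
theorem twos_to_fours_diagonal_py_spec : Claim_equal_twos_to_fours_diagonal_py := by
  intro board piece _ hpre
  unfold Spec_twos_to_fours_diagonal_py
  cases board with
  | nil => rfl
  | cons r0 rest =>
    by_cases hw0 : r0.length = 0
    · -- width 0: both sides are 0
      rw [A_eq_sum]
      simp only [List.headD_cons, hw0, List.range_zero, List.map_nil, List.sum_nil]
      rw [sum_map_zero]
      simp only [twos_to_fours_diagonal_py_alt, hw0, List.range_zero, List.map_nil,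
        Nat.min_zero, List.nil_append, List.append_nil, List.map_append, List.map_map,
        List.sum_append]
      have hz : (pvLineCount piece ∘ fun (_ : Nat) => ([] : List String)) = fun _ => (0 : Int) := by
        funext x
        rfl
      rw [hz, sum_map_zero]
      norm_num
    · have hw1 : 1 ≤ r0.length := by omega
      -- A as a per-cell double Finset sum, split into the two patterns
      have hA : twos_to_fours_diagonal_py (r0 :: rest) piece
          = (∑ r ∈ Finset.range (r0 :: rest).length, ∑ c ∈ Finset.range r0.length,
               pvInd1 (r0 :: rest) piece r c)
          + (∑ r ∈ Finset.range (r0 :: rest).length, ∑ c ∈ Finset.range r0.length,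
               pvInd2 (r0 :: rest) piece r c) := by
        rw [A_eq_sum]
        simp only [List.headD_cons]
        rw [lsum, ← Finset.sum_add_distrib]
        refine Finset.sum_congr rfl fun r _ => ?_
        rw [lsum, Finset.sum_add_distrib]
      rw [hA]
      -- expand B into the four family sums
      have f1 := fam1 (r0 :: rest) piece
      have f2 := fam2 (r0 :: rest) piece
      have f3 := fam3 (r0 :: rest) piece
      have f4 := fam4 (r0 :: rest) piece (by simpa using hw1)
      simp only [List.headD_cons] at f1 f2 f3 f4
      simp only [twos_to_fours_diagonal_py_alt, List.map_append, List.sum_append, List.map_map,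
        Function.comp_def]
      rw [f1, f2, f3, f4]
      -- ↘ part
      have hG1 := reorg (fun r c => pvInd1 (r0 :: rest) piece r c) (r0 :: rest).length r0.length
      -- ↙ part, through the column reflection c ↦ w-1-c
      have hG2 := reorg (fun r c => pvInd2 (r0 :: rest) piece r (r0.length - 1 - c))
        (r0 :: rest).length r0.length
      simp only [] at hG1 hG2
      -- family 3's sum is the first reorg term of the reflected ↙ indicator
      have h3 : (∑ c ∈ Finset.range r0.length,
            ∑ k ∈ Finset.range (min (r0 :: rest).length (c + 1)),
              pvInd2 (r0 :: rest) piece k (c - k))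
          = ∑ c ∈ Finset.range r0.length,
              ∑ k ∈ Finset.range (min (r0 :: rest).length (r0.length - c)),
                pvInd2 (r0 :: rest) piece k (r0.length - 1 - (c + k)) := by
        rw [← Finset.sum_range_reflect (fun c =>
          ∑ k ∈ Finset.range (min (r0 :: rest).length (r0.length - c)),
            pvInd2 (r0 :: rest) piece k (r0.length - 1 - (c + k))) r0.length]
        refine Finset.sum_congr rfl fun c hc => ?_
        have hcw : c < r0.length := Finset.mem_range.mp hc
        rw [show r0.length - (r0.length - 1 - c) = c + 1 from by omega]
        refine Finset.sum_congr rfl fun k _ => ?_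
        exact congrArg _ (by omega)
      -- the reflected per-cell ↙ sum equals the straight one
      have hrefl : (∑ r ∈ Finset.range (r0 :: rest).length, ∑ c ∈ Finset.range r0.length,
            pvInd2 (r0 :: rest) piece r (r0.length - 1 - c))
          = ∑ r ∈ Finset.range (r0 :: rest).length, ∑ c ∈ Finset.range r0.length,
              pvInd2 (r0 :: rest) piece r c :=
        Finset.sum_congr rfl fun r _ =>
          Finset.sum_range_reflect (pvInd2 (r0 :: rest) piece r) r0.length
      rw [h3]
      linarith [hG1, hG2, hrefl]
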